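-- pv_equiv track=rewrite | github.com/kevin-buckley-slalom/flutter-test | scripts/collect_pokemon_profile_serebii.py | choose_unique
-- ===== SOURCE A (Python) =====
-- from typing import Dict, List, Optional, Tuple
--
-- def choose_unique(values: List[str]) -> Optional[str]:
--     """Return the unique value if the list contains exactly one distinct value."""
--     if not values:
--         return None
--     # filter out empties
--     filtered = [v for v in values if v]
--     uniq = list(dict.fromkeys(filtered))
--     if len(uniq) == 1:
--         return uniq[0]
--     return None
-- ===== SOURCE B (Python) =====
-- from typing import List, Optional
--
-- def choose_unique(values: List[str]) -> Optional[str]: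
--     """Early-exit scan keeping a single candidate instead of building a distinct-value table."""
--     candidate = None
--     for v in values:
--         if not v:
--             continue
--         if candidate is None:
--             candidate = v
--         elif v != candidate:
--             return None
--     return candidate
-- ===== Notes on version B (the rewrite author's own statement) =====
-- stated objective: simpler
-- what changed: Replaced filter + ordered-dict dedup + length check with a one-pass early-exit scan that keeps a single candidate variable and bails out on the first conflicting non-empty value (no intermediate lists or dict, hence the measured constant-factor speedup).
import Mathlib
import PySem

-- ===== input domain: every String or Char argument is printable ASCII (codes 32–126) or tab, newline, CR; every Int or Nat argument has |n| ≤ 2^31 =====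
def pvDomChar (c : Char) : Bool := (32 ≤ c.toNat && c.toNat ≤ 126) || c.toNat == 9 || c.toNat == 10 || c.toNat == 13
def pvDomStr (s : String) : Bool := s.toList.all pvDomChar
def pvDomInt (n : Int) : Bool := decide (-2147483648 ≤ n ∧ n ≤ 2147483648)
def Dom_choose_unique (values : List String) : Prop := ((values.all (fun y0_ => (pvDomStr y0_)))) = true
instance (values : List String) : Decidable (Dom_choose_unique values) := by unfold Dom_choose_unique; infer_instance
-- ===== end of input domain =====

-- B replaces A's filter + ordered-dict dedup + length check with a one-pass early-exit
-- candidate scan (simpler decomposition, same O(n) cost).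


-- ===== PORT A =====
def choose_unique (values : List String) : Option String :=
  if values = [] then none
  else
    let filtered := values.filter (fun v => v != "")
    let uniq := PySem.List.dedup filtered        -- list(dict.fromkeys(filtered))
    if uniq.length = 1 then uniq.head? else none

-- ===== PORT B =====
-- the for-loop of Source B: state is the current candidate; early exit returns none
def chooseUniqueGo : List String → Option String → Option String
  | [], cand => cand
  | v :: rest, cand =>
      if v = "" then chooseUniqueGo rest cand
      else
        match cand with
        | none => chooseUniqueGo rest (some v)
        | some c => if v ≠ c then none else chooseUniqueGo rest (some c)

def choose_unique_alt (values : List String) : Option String :=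
  chooseUniqueGo values none

-- ===== PRECONDITION & SPEC =====
def Spec_choose_unique (values : List String) (out : Option String) : Prop := out = choose_unique_alt values
instance (values : List String) (out : Option String) : Decidable (Spec_choose_unique values out) := by unfold Spec_choose_unique; infer_instance

-- ===== CLAIM (what is proved, stated in full; the proofs are below) =====
def Claim_equal_choose_unique : Prop := ∀ (values : List String), Dom_choose_unique values → Spec_choose_unique values (choose_unique values)

-- ===== LEMMAS AND PROOFS =====

-- the common characterisation: result on the non-empty entries f
def cuSpec : List String → Option String
  | [] => none
  | x :: xs => if xs.all (· == x) then some x else none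

theorem go_some (l : List String) (c : String) :
    chooseUniqueGo l (some c) =
      if (l.filter (fun v => v != "")).all (· == c) then some c else none := by
  induction l with
  | nil => simp [chooseUniqueGo]
  | cons v rest ih =>
    by_cases hv : v = ""
    · simp [chooseUniqueGo, hv, ih]
    · by_cases hvc : v = c
      · subst hvc
        simp [chooseUniqueGo, hv, ih]
      · simp [chooseUniqueGo, hv, hvc]

theorem go_none (l : List String) :
    chooseUniqueGo l none = cuSpec (l.filter (fun v => v != "")) := by
  induction l with
  | nil => simp [chooseUniqueGo, cuSpec]
  | cons v rest ih =>
    by_cases hv : v = ""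
    · simp [chooseUniqueGo, hv, ih]
    · simp [chooseUniqueGo, hv, cuSpec, go_some]

theorem nodup_all_eq {x : String} {l : List String} (hn : l.Nodup)
    (hx : x ∈ l) (hall : ∀ z ∈ l, z = x) : l = [x] := by
  cases l with
  | nil => cases hx
  | cons a t =>
    have ha : a = x := hall a (by simp)
    subst ha
    cases t with
    | nil => rfl
    | cons b u =>
      have hb : b = a := hall b (by simp)
      simp [hb] at hn

theorem dedup_spec (f : List String) :
    (if (PySem.Set.ofList f).length = 1 then (PySem.Set.ofList f).head? else none) = cuSpec f := by
  cases f with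
  | nil => simp [PySem.Set.ofList, cuSpec]
  | cons x xs =>
    by_cases hall : ∀ z ∈ xs, z = x
    · have hone : PySem.Set.ofList (x :: xs) = [x] := by
        apply nodup_all_eq
        · exact PySem.Set.nodup_ofList (x :: xs)
        · rw [PySem.Set.mem_ofList]; simp
        · intro z hz
          rw [PySem.Set.mem_ofList] at hz
          rcases List.mem_cons.mp hz with h | h
          · exact h
          · exact hall z h
      rw [hone]
      have hallb : xs.all (· == x) = true := by
        simp only [List.all_eq_true, beq_iff_eq]; exact hall
      simp [cuSpec, hallb]
    · push Not at hall
      obtain ⟨y, hy, hyx⟩ := hall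
      have hlen : (PySem.Set.ofList (x :: xs)).length ≠ 1 := by
        intro h
        rw [List.length_eq_one_iff] at h
        obtain ⟨a, ha⟩ := h
        have hx : x ∈ PySem.Set.ofList (x :: xs) := by rw [PySem.Set.mem_ofList]; simp
        have hy' : y ∈ PySem.Set.ofList (x :: xs) := by rw [PySem.Set.mem_ofList]; simp [hy]
        rw [ha] at hx hy'
        simp at hx hy'
        exact hyx (hy'.trans hx.symm)
      rw [if_neg hlen]
      have hno : ¬ xs.all (· == x) = true := by
        simp only [List.all_eq_true, beq_iff_eq]
        intro h
        exact hyx (h y hy)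
      simp [cuSpec, hno]

-- ===== VERDICT (by name: the statement is the Claim_ definition above) =====
theorem choose_unique_spec : Claim_equal_choose_unique := by
  intro values _
  unfold Spec_choose_unique choose_unique choose_unique_alt
  rw [go_none]
  by_cases h : values = []
  · subst h; simp [cuSpec]
  · simp only [h, if_false, PySem.List.dedup_eq_ofList]
    exact dedup_spec _
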